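-- pv_equiv track=rewrite | github.com/olcseal/sparse | sparse2.py | remEmpty
-- ===== SOURCE A (Python) =====
-- def remEmpty(l):
--     b = []
--     i = 0
--     x = l.count('')
--     while i < x:
--         b.append(l.index(''))
--         l.remove('')
--         i += 1
--     return b
-- ===== SOURCE B (Python) =====
-- def remEmpty(l):
--     out = []
--     j = 0
--     for pos, s in enumerate(l):
--         if s == '':
--             out.append(pos - j)
--             j += 1
--     return out
-- ===== Notes on version B (the rewrite author's own statement) =====
-- stated objective: alternative
-- what changed: Replaced the while loop that repeatedly calls list.index and list.remove (mutating the list) by a single non-mutating enumerate pass that emits pos - j for the j-th empty string.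
import Mathlib
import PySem

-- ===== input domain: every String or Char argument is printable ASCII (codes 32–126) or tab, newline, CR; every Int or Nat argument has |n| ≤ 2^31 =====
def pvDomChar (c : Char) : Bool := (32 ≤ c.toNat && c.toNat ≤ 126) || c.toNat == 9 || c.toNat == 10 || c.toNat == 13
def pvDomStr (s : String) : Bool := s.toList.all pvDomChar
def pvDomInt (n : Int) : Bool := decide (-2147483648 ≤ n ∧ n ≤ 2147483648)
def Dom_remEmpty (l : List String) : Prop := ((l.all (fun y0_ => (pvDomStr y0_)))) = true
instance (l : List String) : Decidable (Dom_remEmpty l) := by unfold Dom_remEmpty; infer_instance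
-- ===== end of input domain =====

-- B replaces A's repeated index/remove loop by a single non-mutating enumerate pass
-- (pos - j for the j-th empty); A mutates its argument (removes the empty strings) —
-- the equivalence proved here is about the RETURN value only.

-- ===== PORT A =====
-- while i < x: b.append(l.index('')); l.remove(''); i += 1   — iterated x = l.count('') times
def remEmptyLoopA : Nat → List String → List Int → List Int
  | 0, _, b => b
  | n + 1, l, b =>
    match PySem.List.index? l "" with
    | some idx => remEmptyLoopA n ((PySem.List.remove? l "").getD l) (b ++ [(idx : Int)])
    | none => b   -- unreachable: fuel equals the count of '' in l

def remEmpty (l : List String) : List Int := remEmptyLoopA (PySem.List.count l "") l []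

-- ===== PORT B =====
-- for pos, s in enumerate(l): if s == '': out.append(pos - j); j += 1
def remEmptyGo : List String → Int → Int → List Int
  | [], _, _ => []
  | s :: rest, pos, j =>
    if s = "" then (pos - j) :: remEmptyGo rest (pos + 1) (j + 1)
    else remEmptyGo rest (pos + 1) j

def remEmpty_alt (l : List String) : List Int := remEmptyGo l 0 0

-- ===== PRECONDITION & SPEC =====
def Spec_remEmpty (l : List String) (out : List Int) : Prop := out = remEmpty_alt l
instance (l : List String) (out : List Int) : Decidable (Spec_remEmpty l out) := by unfold Spec_remEmpty; infer_instance

-- ===== CLAIM (what is proved, stated in full; the proofs are below) =====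
def Claim_equal_remEmpty : Prop := ∀ (l : List String), Dom_remEmpty l → Spec_remEmpty l (remEmpty l)

-- ===== LEMMAS AND PROOFS =====

theorem loopA_acc (n : Nat) (l : List String) (b : List Int) :
    remEmptyLoopA n l b = b ++ remEmptyLoopA n l [] := by
  induction n generalizing l b with
  | zero => simp [remEmptyLoopA]
  | succ n ih =>
    simp only [remEmptyLoopA]
    cases h : PySem.List.index? l "" with
    | none => simp
    | some idx =>
      dsimp only
      rw [ih _ (b ++ [(idx : Int)]), ih _ ([] ++ [(idx : Int)])]
      simp

theorem go_shift (l : List String) (pos j : Int) :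
    remEmptyGo l pos j = (remEmptyGo l 0 0).map (· + (pos - j)) := by
  induction l generalizing pos j with
  | nil => simp [remEmptyGo]
  | cons s rest ih =>
    simp only [remEmptyGo]
    by_cases hs : s = ""
    · rw [if_pos hs, if_pos hs, ih (pos + 1) (j + 1), ih (0 + 1) (0 + 1)]
      simp
    · rw [if_neg hs, if_neg hs, ih (pos + 1) j, ih (0 + 1) 0]
      simp
      intro a _
      ring

theorem loopA_cons_ne (n : Nat) (s : String) (hs : s ≠ "") (rest : List String) :
    remEmptyLoopA n (s :: rest) [] = (remEmptyLoopA n rest []).map (· + 1) := by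
  induction n generalizing rest with
  | zero => simp [remEmptyLoopA]
  | succ n ih =>
    simp only [remEmptyLoopA]
    rw [PySem.List.index?_cons_of_ne rest hs, PySem.List.remove?_cons_of_ne rest hs]
    cases h : PySem.List.index? rest "" with
    | none => simp
    | some idx =>
      have hmem : "" ∈ rest := by
        have hsome : (PySem.List.index? rest "").isSome = true := by rw [h]; rfl
        exact (PySem.List.index?_isSome_iff rest "").mp hsome
      have hrem : (PySem.List.remove? rest "") = some (rest.erase "") :=
        PySem.List.remove?_eq_some_erase rest "" hmem
      simp only [hrem, Option.map_some, Option.getD_some]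
      rw [loopA_acc n _ ([] ++ [((↑(idx + 1) : Int))]), loopA_acc n _ ([] ++ [(idx : Int)]),
        ih (rest.erase "")]
      simp

theorem main_eq (l : List String) :
    remEmptyLoopA (PySem.List.count l "") l [] = remEmptyGo l 0 0 := by
  induction l with
  | nil => simp [remEmptyLoopA, remEmptyGo, PySem.List.count]
  | cons s rest ih =>
    by_cases hs : s = ""
    · subst hs
      have hc : PySem.List.count ("" :: rest) "" = PySem.List.count rest "" + 1 := by
        simp [PySem.List.count]
      rw [hc]
      simp only [remEmptyLoopA, PySem.List.index?_cons_self, PySem.List.remove?_cons_self,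
        Option.getD_some]
      rw [loopA_acc _ _ ([] ++ [((0 : Nat) : Int)]), ih]
      simp only [remEmptyGo]
      rw [go_shift rest (0 + 1) (0 + 1)]
      simp
    · have hc : PySem.List.count (s :: rest) "" = PySem.List.count rest "" := by
        simp [PySem.List.count, hs]
      rw [hc, loopA_cons_ne _ s hs rest, ih]
      simp only [remEmptyGo, if_neg hs]
      rw [go_shift rest (0 + 1) 0]
      simp

-- ===== VERDICT (by name: the statement is the Claim_ definition above) =====
theorem remEmpty_spec : Claim_equal_remEmpty := by
  intro l _
  unfold Spec_remEmpty remEmpty remEmpty_alt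
  exact main_eq l
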